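-- pv_equiv track=rewrite | github.com/aumhaa/monomodular | b99e/Codec/Codec.py | generate_strip_string
-- ===== SOURCE A (Python) =====
-- def generate_strip_string(display_string):
-- 	NUM_CHARS_PER_DISPLAY_STRIP = 12
-- 	if (not display_string):
-- 		return (' ' * NUM_CHARS_PER_DISPLAY_STRIP)
-- 	if ((len(display_string.strip()) > (NUM_CHARS_PER_DISPLAY_STRIP - 1)) and (display_string.endswith('dB') and (display_string.find('.') != -1))):
-- 		display_string = display_string[:-2]
-- 	if (len(display_string) > (NUM_CHARS_PER_DISPLAY_STRIP - 1)):
-- 		for um in [' ',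
-- 		 'i',
-- 		 'o',
-- 		 'u',
-- 		 'e',
-- 		 'a']:
-- 			while ((len(display_string) > (NUM_CHARS_PER_DISPLAY_STRIP - 1)) and (display_string.rfind(um, 1) != -1)):
-- 				um_pos = display_string.rfind(um, 1)
-- 				display_string = (display_string[:um_pos] + display_string[(um_pos + 1):])
-- 	else:
-- 		display_string = display_string.center((NUM_CHARS_PER_DISPLAY_STRIP - 1))
-- 	ret = u''
-- 	for i in range((NUM_CHARS_PER_DISPLAY_STRIP - 1)):
-- 		if ((ord(display_string[i]) > 127) or (ord(display_string[i]) < 0)):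
-- 			ret += ' '
-- 		else:
-- 			ret += display_string[i]
--
-- 	ret += ' '
-- 	assert (len(ret) == NUM_CHARS_PER_DISPLAY_STRIP)
-- 	return ret
-- ===== SOURCE B (Python) =====
-- def generate_strip_string(display_string):
--     N = 11  # NUM_CHARS_PER_DISPLAY_STRIP - 1
--     if not display_string:
--         return ' ' * 12
--     s = display_string
--     if len(s.strip()) > N and s.endswith('dB') and '.' in s:
--         s = s[:-2]
--     if len(s) > N:
--         # One right-to-left pass per character class: with a removal budget of
--         # len(s) - N, drop the budgeted number of rightmost occurrences (index >= 1).
--         for um in ' iouea':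
--             budget = len(s) - N
--             if budget <= 0 or s.find(um, 1) == -1:
--                 continue
--             kept = []
--             for ch in reversed(s[1:]):
--                 if budget > 0 and ch == um:
--                     budget -= 1
--                 else:
--                     kept.append(ch)
--             kept.append(s[0])
--             s = ''.join(reversed(kept))
--     else:
--         pad = N - len(s)
--         s = ' ' * (pad - pad // 2) + s + ' ' * (pad // 2)
--     return ''.join(ch if ord(ch) <= 127 else ' ' for ch in s[:N]) + ' '
-- ===== Notes on version B (the rewrite author's own statement) =====
-- stated objective: faster
-- what changed: A repeatedly calls rfind and resplices the string once per removed character (quadratic); B removes the same characters with a single budgeted right-to-left pass per character class and one rebuild, and copies the final 11 characters with a slice+map instead of an indexed loop.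
import Mathlib
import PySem

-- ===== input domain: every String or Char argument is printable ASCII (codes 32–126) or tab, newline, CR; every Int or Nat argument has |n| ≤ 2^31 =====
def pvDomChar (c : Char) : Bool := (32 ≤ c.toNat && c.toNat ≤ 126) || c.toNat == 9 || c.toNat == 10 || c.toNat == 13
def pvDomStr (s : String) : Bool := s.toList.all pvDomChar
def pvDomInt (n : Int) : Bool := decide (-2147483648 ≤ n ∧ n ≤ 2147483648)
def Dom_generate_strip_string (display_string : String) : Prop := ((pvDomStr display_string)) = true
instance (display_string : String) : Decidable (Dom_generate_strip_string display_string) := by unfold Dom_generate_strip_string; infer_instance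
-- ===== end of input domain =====

-- B replaces A's repeated rfind-and-resplice vowel removal by one budgeted
-- right-to-left pass per character class (objective: faster).

-- ===== PORT A =====

-- bounds of s.rfind(um, 1) when it is not -1; cited by pvAWhile's decreasing_by
theorem pvRfindGo_bounds (s : List Char) (um : Char) (x : Nat)
    (h : PySem.Chars.rfind.go s [um] x ≠ -1) :
    0 ≤ PySem.Chars.rfind.go s [um] x ∧ PySem.Chars.rfind.go s [um] x < s.length := by
  induction x with
  | zero =>
    rw [PySem.Chars.rfind.go] at h ⊢
    by_cases hp : [um].isPrefixOf s = true
    · rw [if_pos hp] at h ⊢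
      refine ⟨le_refl 0, ?_⟩
      cases s with
      | nil => simp [List.isPrefixOf] at hp
      | cons a t => simp
    · rw [if_neg hp] at h; exact absurd rfl h
  | succ j ih =>
    rw [PySem.Chars.rfind.go] at h ⊢
    by_cases hp : [um].isPrefixOf (List.drop (j + 1) s) = true
    · rw [if_pos hp] at h ⊢
      have hne : ¬ (List.drop (j + 1) s = []) := by
        intro hnil; rw [hnil] at hp; simp [List.isPrefixOf] at hp
      rw [List.drop_eq_nil_iff] at hne
      constructor
      · positivity
      · exact_mod_cast (by omega : j + 1 < s.length)
    · rw [if_neg hp] at h ⊢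
      exact ih h

theorem pvRfindFrom_cons (hc um : Char) (t : List Char) :
    PySem.Chars.rfindFrom (hc :: t) [um] 1 none =
      if PySem.Chars.rfind t [um] = -1 then -1 else 1 + PySem.Chars.rfind t [um] := by
  rw [PySem.Chars.rfindFrom]
  norm_num

theorem pvRfindFrom_bounds (s : List Char) (um : Char)
    (h : PySem.Chars.rfindFrom s [um] 1 none ≠ -1) (hlen : 0 < s.length) :
    1 ≤ PySem.Chars.rfindFrom s [um] 1 none ∧
      PySem.Chars.rfindFrom s [um] 1 none < s.length := by
  cases s with
  | nil => simp at hlen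
  | cons hc t =>
    rw [pvRfindFrom_cons] at h ⊢
    by_cases hr : PySem.Chars.rfind t [um] = -1
    · rw [if_pos hr] at h; exact absurd rfl h
    · rw [if_neg hr] at h ⊢
      have hb := pvRfindGo_bounds t um t.length hr
      rw [PySem.Chars.rfind] at hr ⊢
      simp only [List.length_cons]
      push_cast
      omega

-- the while-loop of A: remove the rightmost occurrence of um (at index ≥ 1) while len > 11
def pvAWhile (um : Char) (s : List Char) : List Char :=
  if h : 11 < s.length ∧ PySem.Chars.rfindFrom s [um] 1 none ≠ -1 then
    let um_pos := PySem.Chars.rfindFrom s [um] 1 none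
    pvAWhile um (PySem.List.slice s none (some um_pos) ++ PySem.List.slice s (some (um_pos + 1)) none)
  else s
termination_by s.length
decreasing_by
  have hb := pvRfindFrom_bounds s um h.2 (by omega)
  have h1 : PySem.List.slice s none (some um_pos) = List.take um_pos.toNat s :=
    PySem.List.slice_to s (by omega)
  have h2 : PySem.List.slice s (some (um_pos + 1)) none = List.drop (um_pos + 1).toNat s :=
    PySem.List.slice_from s (by omega)
  simp only [um_pos] at *
  rw [h1, h2]
  simp only [List.length_append, List.length_take, List.length_drop]
  omega

def generate_strip_string (display_string : String) : String :=
  -- NUM_CHARS_PER_DISPLAY_STRIP = 12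
  if display_string = "" then String.ofList (List.replicate 12 ' ') else
  let s0 := display_string.toList
  let s1 := if 11 < (PySem.Chars.strip s0).length ∧ PySem.Chars.endswith s0 ['d', 'B'] = true ∧
               PySem.Chars.find s0 ['.'] ≠ -1
            then PySem.List.slice s0 none (some (-2)) else s0
  let s2 := if 11 < s1.length then
      [' ', 'i', 'o', 'u', 'e', 'a'].foldl (fun s um => pvAWhile um s) s1
    else
      -- str.center(11); CPython: marg = width - len, left = marg // 2 + (marg & width & 1)
      let marg := 11 - s1.length
      let left := marg / 2 + (marg &&& 11 &&& 1)
      List.replicate left ' ' ++ s1 ++ List.replicate (marg - left) ' '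
  let ret := (PySem.List.pyRange 0 11).foldl (fun ret i =>
      match PySem.List.pyGet? s2 i with
      | none => ret   -- IndexError; unreachable: here s2 always has length ≥ 11
      | some c => if 127 < (c.toNat : Int) ∨ (c.toNat : Int) < 0 then ret ++ [' '] else ret ++ [c])
    []
  String.ofList (ret ++ [' '])

-- ===== PORT B =====

-- one budgeted right-to-left pass: drop up to `budget` rightmost occurrences of um past index 0;
-- classes with no budget or no occurrence past index 0 are skipped ('continue')
def pvBPass (um : Char) (s : List Char) : List Char :=
  if ((s.length : Int) - 11 ≤ 0) ∨ PySem.Chars.findFrom s [um] 1 none = -1 then s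
  else match s with
  | [] => []   -- unreachable: only applied to strings of length ≥ 11
  | h :: t =>
    let budget : Int := ((h :: t).length : Int) - 11
    let p := t.reverse.foldl
      (fun (st : Int × List Char) ch =>
        if st.1 > 0 && (ch == um) then (st.1 - 1, st.2) else (st.1, st.2 ++ [ch]))
      (budget, ([] : List Char))
    (p.2 ++ [h]).reverse

def generate_strip_string_alt (display_string : String) : String :=
  if display_string = "" then String.ofList (List.replicate 12 ' ') else
  let s0 := display_string.toList
  let s1 := if 11 < (PySem.Chars.strip s0).length ∧ PySem.Chars.endswith s0 ['d', 'B'] = true ∧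
               PySem.Chars.isIn ['.'] s0 = true
            then PySem.List.slice s0 none (some (-2)) else s0
  let s2 := if 11 < s1.length then
      [' ', 'i', 'o', 'u', 'e', 'a'].foldl (fun s um => pvBPass um s) s1
    else
      let pad := 11 - s1.length
      List.replicate (pad - pad / 2) ' ' ++ s1 ++ List.replicate (pad / 2) ' '
  String.ofList ((PySem.List.slice s2 none (some 11)).map
    (fun ch => if ch.toNat ≤ 127 then ch else ' ') ++ [' '])

-- ===== PRECONDITION & SPEC =====
def Spec_generate_strip_string (display_string : String) (out : String) : Prop := out = generate_strip_string_alt display_string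
instance (display_string : String) (out : String) : Decidable (Spec_generate_strip_string display_string out) := by unfold Spec_generate_strip_string; infer_instance

-- ===== CLAIM (what is proved, stated in full; the proofs are below) =====
def Claim_equal_generate_strip_string : Prop := ∀ (display_string : String), Dom_generate_strip_string display_string → Spec_generate_strip_string display_string (generate_strip_string display_string)

-- ===== LEMMAS AND PROOFS =====

-- proof-side recursion computing what B's budgeted pass keeps, in scan order
def pvDropBudget (um : Char) (b : Int) : List Char → List Char
  | [] => []
  | c :: cs => if 0 < b ∧ c = um then pvDropBudget um (b - 1) cs else c :: pvDropBudget um b cs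

theorem pvFoldl_dropBudget (um : Char) (l : List Char) : ∀ (b : Int) (acc : List Char),
    (l.foldl (fun (st : Int × List Char) ch =>
        if st.1 > 0 && (ch == um) then (st.1 - 1, st.2) else (st.1, st.2 ++ [ch]))
      (b, acc)).2 = acc ++ pvDropBudget um b l := by
  induction l with
  | nil => intro b acc; simp [pvDropBudget]
  | cons c cs ih =>
    intro b acc
    by_cases hc : 0 < b ∧ c = um
    · have hb : (b > 0 && (c == um)) = true := by
        simp only [Bool.and_eq_true, decide_eq_true_eq, beq_iff_eq]; exact ⟨hc.1, hc.2⟩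
      simp only [List.foldl_cons, hb, if_true, pvDropBudget, if_pos hc]
      exact ih (b - 1) acc
    · have hb : (b > 0 && (c == um)) = false := by
        simp only [Bool.and_eq_false_iff, decide_eq_false_iff_not, beq_eq_false_iff_ne]
        by_cases h1 : 0 < b
        · right; intro he; exact hc ⟨h1, he⟩
        · left; exact h1
      simp only [List.foldl_cons, hb, if_false, Bool.false_eq_true, pvDropBudget, if_neg hc]
      rw [ih b (acc ++ [c])]
      simp

theorem pvDropBudget_nonpos (um : Char) (b : Int) (hb : b ≤ 0) (l : List Char) :
    pvDropBudget um b l = l := by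
  induction l with
  | nil => rfl
  | cons c cs ih => rw [pvDropBudget, if_neg (by intro hc; omega), ih]


theorem pvDropBudget_not_mem (um : Char) (b : Int) (l : List Char) (hm : um ∉ l) :
    pvDropBudget um b l = l := by
  induction l with
  | nil => rfl
  | cons c cs ih =>
    have hc : c ≠ um := by intro he; exact hm (by rw [he]; exact List.mem_cons_self)
    rw [pvDropBudget, if_neg (by intro hx; exact hc hx.2), ih (fun hx => hm (List.mem_cons_of_mem _ hx))]


theorem pvBPass_eq (um h : Char) (t : List Char) :
    pvBPass um (h :: t) = h :: (pvDropBudget um ((t.length : Int) + 1 - 11) t.reverse).reverse := by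
  rw [pvBPass]
  by_cases hg : (((h :: t).length : Int) - 11 ≤ 0) ∨
      PySem.Chars.findFrom (h :: t) [um] 1 none = -1
  · rw [if_pos hg]
    rcases hg with hg | hg
    · rw [pvDropBudget_nonpos um _ (by simp only [List.length_cons] at hg ⊢; push_cast at hg ⊢; omega),
        List.reverse_reverse]
    · have hmem : um ∉ t := by
        have hk := PySem.Chars.findFrom_natCast_eq_neg_one_iff (h :: t) [um] 1 (by simp)
        rw [Nat.cast_one] at hk
        have := hk.mp hg
        rw [List.drop_succ_cons, List.drop_zero, List.singleton_infix_iff] at this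
        exact this
      rw [pvDropBudget_not_mem um _ _ (by simpa using hmem), List.reverse_reverse]
  · rw [if_neg hg]
    show ((t.reverse.foldl _ (((h :: t).length : Int) - 11, ([] : List Char))).2 ++ [h]).reverse = _
    rw [pvFoldl_dropBudget]
    simp only [List.length_cons, List.nil_append, List.reverse_append, List.reverse_cons,
      List.reverse_nil, List.nil_append, List.cons_append]
    norm_num

theorem pvDropBudget_append_not_mem (um : Char) (w : List Char) (hm : um ∉ w) :
    ∀ (b : Int) (r : List Char), pvDropBudget um b (w ++ r) = w ++ pvDropBudget um b r := by
  induction w with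
  | nil => intro b r; simp
  | cons c cs ih =>
    intro b r
    have hc : c ≠ um := by intro he; exact hm (by rw [he]; exact List.mem_cons_self)
    rw [List.cons_append, pvDropBudget, if_neg (by intro hx; exact hc hx.2),
      ih (fun hx => hm (List.mem_cons_of_mem _ hx)) b r, List.cons_append]

theorem pvDropBudget_cons_self (um : Char) (b : Int) (hb : 0 < b) (r : List Char) :
    pvDropBudget um b (um :: r) = pvDropBudget um (b - 1) r := by
  rw [pvDropBudget, if_pos ⟨hb, rfl⟩]

theorem pvDropBudget_length (um : Char) (l : List Char) : ∀ (b : Int),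
    l.length - b.toNat ≤ (pvDropBudget um b l).length := by
  induction l with
  | nil => intro b; simp [pvDropBudget]
  | cons c cs ih =>
    intro b
    by_cases hc : 0 < b ∧ c = um
    · rw [pvDropBudget, if_pos hc]
      have := ih (b - 1)
      have hb : b.toNat = (b - 1).toNat + 1 := by omega
      simp only [List.length_cons]
      omega
    · rw [pvDropBudget, if_neg hc]
      have := ih b
      simp only [List.length_cons]
      omega

-- ---- characterising A's rfind on a single-character needle -----------------

theorem pvSingle_isPrefixOf (um : Char) (ys : List Char) :
    [um].isPrefixOf ys = match ys with | [] => false | y :: _ => um == y := by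
  cases ys <;> simp [List.isPrefixOf]

theorem pvRfind_nil (um : Char) : PySem.Chars.rfind [] [um] = -1 := by
  simp [PySem.Chars.rfind, PySem.Chars.rfind.go, List.isPrefixOf]

theorem pvRfindGo_append (l : List Char) (c um : Char) :
    ∀ (x : Nat), x < l.length →
      PySem.Chars.rfind.go (l ++ [c]) [um] x = PySem.Chars.rfind.go l [um] x := by
  intro x
  induction x with
  | zero =>
    intro hx
    rw [PySem.Chars.rfind.go, PySem.Chars.rfind.go]
    cases l with
    | nil => simp at hx
    | cons a t => simp [pvSingle_isPrefixOf]
  | succ j ih =>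
    intro hx
    rw [PySem.Chars.rfind.go, PySem.Chars.rfind.go]
    have hd : List.drop (j + 1) (l ++ [c]) = List.drop (j + 1) l ++ [c] := by
      rw [List.drop_append_of_le_length (by omega)]
    rw [hd]
    have hne : List.drop (j + 1) l ≠ [] := by
      rw [ne_eq, List.drop_eq_nil_iff]; omega
    obtain ⟨y, ys, hys⟩ := List.exists_cons_of_ne_nil hne
    rw [hys, List.cons_append, pvSingle_isPrefixOf, pvSingle_isPrefixOf]
    by_cases hy : (um == y) = true
    · simp [hy]
    · simp only [Bool.not_eq_true] at hy
      simp only [hy, Bool.false_eq_true, if_false]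
      exact ih (by omega)

theorem pvRfind_append (l : List Char) (c um : Char) :
    PySem.Chars.rfind (l ++ [c]) [um] =
      if c = um then (l.length : Int) else PySem.Chars.rfind l [um] := by
  cases l with
  | nil =>
    rw [PySem.Chars.rfind, PySem.Chars.rfind]
    simp only [List.nil_append, List.length_cons, List.length_nil]
    rw [PySem.Chars.rfind.go, PySem.Chars.rfind.go, PySem.Chars.rfind.go]
    simp only [List.drop_succ_cons, List.drop_nil, pvSingle_isPrefixOf]
    by_cases hcu : c = um
    · simp [hcu, List.isPrefixOf]
    · simp [List.isPrefixOf, if_neg hcu, beq_eq_false_iff_ne, Ne.symm hcu]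
  | cons a l' =>
    rw [PySem.Chars.rfind, PySem.Chars.rfind]
    simp only [List.cons_append, List.length_cons, List.length_append, List.length_nil]
    have e1 : l'.length + 1 + 1 = (l'.length + 1) + 1 := rfl
    rw [PySem.Chars.rfind.go, PySem.Chars.rfind.go, PySem.Chars.rfind.go]
    have hd1 : List.drop (l'.length + 1 + 1) (a :: (l' ++ [c])) = [] := by
      rw [List.drop_eq_nil_iff]; simp
    have hd2 : List.drop (l'.length + 1) (a :: (l' ++ [c])) = [c] := by
      rw [List.drop_succ_cons, List.drop_left' rfl]
    have hd3 : List.drop (l'.length + 1) (a :: l') = [] := by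
      rw [List.drop_eq_nil_iff]; simp
    rw [hd1, hd2, hd3]
    simp only [List.isPrefixOf, pvSingle_isPrefixOf, Bool.false_eq_true, if_false,
      Bool.and_true]
    by_cases hcu : c = um
    · simp [hcu]
    · rw [if_neg (by simp [beq_eq_false_iff_ne, Ne.symm hcu]), if_neg hcu]
      exact pvRfindGo_append (a :: l') c um l'.length (by simp)

theorem pvRfind_not_mem (um : Char) (l : List Char) (hm : um ∉ l) :
    PySem.Chars.rfind l [um] = -1 := by
  induction l using List.reverseRecOn with
  | nil => exact pvRfind_nil um
  | append_singleton l c ih =>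
    rw [pvRfind_append, if_neg (by intro he; exact hm (by rw [he]; simp))]
    exact ih (fun hx => hm (by simp [hx]))

theorem pvRfind_last (um : Char) (u v : List Char) (hv : um ∉ v) :
    PySem.Chars.rfind (u ++ um :: v) [um] = (u.length : Int) := by
  induction v using List.reverseRecOn with
  | nil =>
    have : u ++ [um] = u ++ [um] := rfl
    rw [show u ++ um :: ([] : List Char) = u ++ [um] by simp, pvRfind_append, if_pos rfl]
  | append_singleton v c ih =>
    have hc : c ≠ um := by intro he; exact hv (by simp [he])
    rw [show u ++ um :: (v ++ [c]) = (u ++ um :: v) ++ [c] by simp, pvRfind_append,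
      if_neg hc, ih (fun hx => hv (by simp [hx]))]

-- decompose a list at the LAST occurrence of um
theorem pvExists_last (um : Char) (t : List Char) (hm : um ∈ t) :
    ∃ u v, t = u ++ um :: v ∧ um ∉ v := by
  induction t using List.reverseRecOn with
  | nil => simp at hm
  | append_singleton t c ih =>
    by_cases hc : c = um
    · exact ⟨t, [], by simp [hc], by simp⟩
    · have hm' : um ∈ t := by
        rcases List.mem_append.mp hm with h | h
        · exact h
        · simp at h; exact absurd h.symm hc
      obtain ⟨u, v, rfl, hv⟩ := ih hm'
      exact ⟨u, v ++ [c], by simp, by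
        intro hx
        rcases List.mem_append.mp hx with h | h
        · exact hv h
        · simp at h; exact hc h.symm⟩

-- the heart of the equivalence: A's while-loop equals the budgeted reverse pass
theorem pvAWhile_eq_aux (n : Nat) : ∀ (um h : Char) (t : List Char), t.length ≤ n →
    pvAWhile um (h :: t) =
      h :: (pvDropBudget um ((t.length : Int) + 1 - 11) t.reverse).reverse := by
  induction n with
  | zero =>
    intro um h t ht
    have htn : t = [] := List.eq_nil_of_length_eq_zero (by omega)
    subst htn
    rw [pvAWhile]
    rw [dif_neg (fun hc => by simp at hc)]
    simp [pvDropBudget]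
  | succ n ih =>
    intro um h t ht
    by_cases hlen : 11 < t.length + 1
    · by_cases hmem : um ∈ t
      · obtain ⟨u, v, ht, hv⟩ := pvExists_last um t hmem
        subst ht
        have hrf : PySem.Chars.rfindFrom (h :: (u ++ um :: v)) [um] 1 none = (u.length : Int) + 1 := by
          rw [pvRfindFrom_cons, pvRfind_last um u v hv]
          rw [if_neg (by omega)]
          ring
        rw [pvAWhile]
        rw [dif_pos ⟨by simpa using hlen, by rw [hrf]; omega⟩]
        simp only [hrf]
        have hs1 : PySem.List.slice (h :: (u ++ um :: v)) none (some ((u.length : Int) + 1)) =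
            h :: u := by
          rw [PySem.List.slice_to _ (by positivity)]
          have : ((u.length : Int) + 1).toNat = u.length + 1 := by omega
          rw [this]
          simp
        have hs2 : PySem.List.slice (h :: (u ++ um :: v)) (some ((u.length : Int) + 1 + 1)) none =
            v := by
          rw [PySem.List.slice_from _ (by positivity)]
          have h2 : ((u.length : Int) + 1 + 1).toNat = (u.length + 1) + 1 := by omega
          rw [h2, List.drop_succ_cons, show u ++ um :: v = (u ++ [um]) ++ v by simp,
            List.drop_left' (by simp)]
        rw [hs1, hs2]
        have hrec := ih um h (u ++ v) (by
          simp only [List.length_append, List.length_cons] at ht ⊢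
          omega)
        rw [show (h :: u) ++ v = h :: (u ++ v) by simp, hrec]
        congr 1
        have hb : (0 : Int) < ((u ++ um :: v).length : Int) + 1 - 11 := by
          simp only [List.length_append, List.length_cons] at hlen ⊢
          push_cast; omega
        rw [show (u ++ um :: v).reverse = v.reverse ++ um :: u.reverse by simp]
        rw [pvDropBudget_append_not_mem um v.reverse (by simpa using hv),
          pvDropBudget_cons_self um _ hb]
        rw [show (u ++ v).reverse = v.reverse ++ u.reverse by simp]
        rw [pvDropBudget_append_not_mem um v.reverse (by simpa using hv)]
        have hbud : ((u ++ um :: v).length : Int) + 1 - 11 - 1 = ((u ++ v).length : Int) + 1 - 11 := by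
          simp only [List.length_append, List.length_cons]
          push_cast
          ring
        rw [hbud]
      · rw [pvAWhile]
        rw [dif_neg (by
          intro hc
          apply hc.2
          rw [pvRfindFrom_cons, pvRfind_not_mem um t hmem]
          simp)]
        rw [pvDropBudget_not_mem um _ _ (by simpa using hmem)]
        simp
    · rw [pvAWhile]
      rw [dif_neg (fun hc => hlen (by simpa using hc.1))]
      rw [pvDropBudget_nonpos um _ (by push_cast; omega)]
      simp

theorem pvAWhile_eq (um h : Char) (t : List Char) :
    pvAWhile um (h :: t) =
      h :: (pvDropBudget um ((t.length : Int) + 1 - 11) t.reverse).reverse :=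
  pvAWhile_eq_aux t.length um h t le_rfl

theorem pvPass_length (um : Char) (l : List Char) (hl : 11 ≤ l.length) :
    11 ≤ (pvBPass um l).length := by
  cases l with
  | nil => simp at hl
  | cons h t =>
    rw [pvBPass_eq]
    have := pvDropBudget_length um t.reverse ((t.length : Int) + 1 - 11)
    simp only [List.length_reverse] at this
    simp only [List.length_cons] at hl
    simp only [List.length_cons, List.length_reverse]
    omega

theorem pvFold_eq (cls : List Char) : ∀ (l : List Char), 11 ≤ l.length →
    (cls.foldl (fun s um => pvAWhile um s) l = cls.foldl (fun s um => pvBPass um s) l ∧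
      11 ≤ (cls.foldl (fun s um => pvBPass um s) l).length) := by
  induction cls with
  | nil => intro l hl; exact ⟨rfl, hl⟩
  | cons um cls ih =>
    intro l hl
    cases l with
    | nil => simp at hl
    | cons h t =>
      have hstep : pvAWhile um (h :: t) = pvBPass um (h :: t) := by
        rw [pvAWhile_eq, pvBPass_eq]
      simp only [List.foldl_cons, hstep]
      exact ih (pvBPass um (h :: t)) (pvPass_length um (h :: t) hl)

-- the final character-copy loop of A equals B's map over the first 11 characters
theorem pvRetLoop (n : Nat) (s : List Char) (hn : n ≤ s.length) : ∀ (acc : List Char),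
    (PySem.List.pyRange 0 n).foldl (fun ret i =>
        match PySem.List.pyGet? s i with
        | none => ret
        | some c => if 127 < (c.toNat : Int) ∨ (c.toNat : Int) < 0 then ret ++ [' '] else ret ++ [c])
      acc = acc ++ (s.take n).map (fun ch => if ch.toNat ≤ 127 then ch else ' ') := by
  induction n with
  | zero =>
    intro acc
    simp [PySem.List.pyRange_of_pos]
  | succ m ih =>
    intro acc
    have hm : m < s.length := by omega
    have hsplit : PySem.List.pyRange 0 ((m : Nat) + 1 : Nat) =
        PySem.List.pyRange 0 (m : Nat) ++ PySem.List.pyRange (m : Nat) ((m : Nat) + 1 : Nat) := by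
      push_cast
      exact PySem.List.pyRange_one_append 0 m (m + 1) (by positivity) (by omega)
    have hone : PySem.List.pyRange ((m : Nat) : Int) (((m : Nat) + 1 : Nat) : Int) = [((m : Nat) : Int)] := by
      rw [PySem.List.pyRange_one_cons (by push_cast; omega)]
      have : PySem.List.pyRange (((m : Nat) : Int) + 1) (((m : Nat) + 1 : Nat) : Int) = [] := by
        push_cast
        simp [PySem.List.pyRange_of_pos]
      rw [this]
    rw [hsplit, List.foldl_append, ih (by omega) acc, hone]
    simp only [List.foldl_cons, List.foldl_nil]
    rw [PySem.List.pyGet?_natCast, List.getElem?_eq_getElem hm]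
    have htake : s.take (m + 1) = s.take m ++ [s[m]] := by
      rw [List.take_succ, List.getElem?_eq_getElem hm]
      rfl
    rw [htake, List.map_append, List.map_cons, List.map_nil]
    change ite _ _ _ = _
    by_cases hnat : s[m].toNat ≤ 127
    · have h1 : ¬ (127 < (s[m].toNat : Int) ∨ (s[m].toNat : Int) < 0) := by omega
      rw [if_neg h1, if_pos hnat, List.append_assoc]
    · have h1 : (127 < (s[m].toNat : Int) ∨ (s[m].toNat : Int) < 0) := by omega
      rw [if_pos h1, if_neg hnat, List.append_assoc]

-- CPython's center-split arithmetic for odd width 11 equals B's pad split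
theorem pvCenterArith (m : Nat) (hm : m ≤ 11) :
    m / 2 + (m &&& 11 &&& 1) = m - m / 2 ∧ m - (m / 2 + (m &&& 11 &&& 1)) = m / 2 := by
  interval_cases m <;> exact ⟨by decide, by decide⟩

theorem pvTail (s2 : List Char) (h2 : 11 ≤ s2.length) :
    ((PySem.List.pyRange 0 11).foldl (fun ret i =>
        match PySem.List.pyGet? s2 i with
        | none => ret
        | some c => if 127 < (c.toNat : Int) ∨ (c.toNat : Int) < 0 then ret ++ [' '] else ret ++ [c])
      []) =
      (PySem.List.slice s2 none (some 11)).map (fun ch => if ch.toNat ≤ 127 then ch else ' ') := by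
  have h := pvRetLoop 11 s2 h2 []
  have hcast : (((11 : Nat) : Int)) = (11 : Int) := by norm_num
  rw [hcast] at h
  rw [h, List.nil_append, PySem.List.slice_to _ (by norm_num)]
  have : Int.toNat 11 = 11 := rfl
  rw [this]

theorem pvCenter_len (s1 : List Char) (hle : ¬ 11 < s1.length) :
    (List.replicate ((11 - s1.length) - (11 - s1.length) / 2) ' ' ++ s1 ++
      List.replicate ((11 - s1.length) / 2) ' ').length = 11 := by
  simp only [List.length_append, List.length_replicate]
  omega

theorem pvMain (display_string : String) :
    generate_strip_string display_string = generate_strip_string_alt display_string := by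
  rw [generate_strip_string, generate_strip_string_alt]
  by_cases hds : display_string = ""
  · rw [if_pos hds, if_pos hds]
  · rw [if_neg hds, if_neg hds]
    dsimp only
    have hcond : (11 < (PySem.Chars.strip display_string.toList).length ∧
        PySem.Chars.endswith display_string.toList ['d', 'B'] = true ∧
        PySem.Chars.find display_string.toList ['.'] ≠ -1) ↔
        (11 < (PySem.Chars.strip display_string.toList).length ∧
        PySem.Chars.endswith display_string.toList ['d', 'B'] = true ∧
        PySem.Chars.isIn ['.'] display_string.toList = true) := by
      constructor
      · rintro ⟨a, b, c⟩
        exact ⟨a, b, (PySem.Chars.isIn_iff_infix _ _).mpr ((PySem.Chars.find_ne_neg_one_iff _ _).mp c)⟩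
      · rintro ⟨a, b, c⟩
        exact ⟨a, b, (PySem.Chars.find_ne_neg_one_iff _ _).mpr ((PySem.Chars.isIn_iff_infix _ _).mp c)⟩
    rw [if_congr hcond rfl rfl]
    generalize (if (11 < (PySem.Chars.strip display_string.toList).length ∧
        PySem.Chars.endswith display_string.toList ['d', 'B'] = true ∧
        PySem.Chars.isIn ['.'] display_string.toList = true)
      then PySem.List.slice display_string.toList none (some (-2))
      else display_string.toList) = s1
    by_cases hlong : 11 < s1.length
    · rw [if_pos hlong, if_pos hlong]
      obtain ⟨heq, hlen⟩ := pvFold_eq [' ', 'i', 'o', 'u', 'e', 'a'] s1 (le_of_lt hlong)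
      rw [heq, pvTail _ hlen]
    · rw [if_neg hlong, if_neg hlong]
      obtain ⟨h1, h2⟩ := pvCenterArith (11 - s1.length) (by omega)
      rw [h1]
      have h3 : 11 - s1.length - (11 - s1.length - (11 - s1.length) / 2) = (11 - s1.length) / 2 := by
        omega
      rw [h3, pvTail _ (le_of_eq (pvCenter_len s1 hlong).symm)]

-- ===== VERDICT (by name: the statement is the Claim_ definition above) =====
theorem generate_strip_string_spec : Claim_equal_generate_strip_string := by
  intro ds _
  exact pvMain ds
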